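-- pv_equiv track=rewrite | github.com/hadi41/hadi_LZ_package | tests/test_lz_suffix.py | get_inefficient_lz76_phrase_count
-- ===== SOURCE A (Python) =====
-- def get_inefficient_lz76_phrase_count(input_string: str) -> int:
--     """Calculates LZ76 phrase count using a basic, less optimized Python approach.
--
--     This function mimics the core logic of an inefficient LZ76 parsing to count
--     the number of phrases (dictionary size). It's used here as a reference for
--     verifying the suffix tree based implementations.
--
--     The logic: iterate through the string, building a `current_word`. If this
--     `current_word` is not found as a substring in the history of (`parsed_text` +
--     `current_word` without its last character), then `current_word` becomes a new phrase,
--     is added to `parsed_text`, and `dictionary_size` is incremented.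
--
--     Args:
--         input_string (str): The string to analyze.
--
--     Returns:
--         int: The number of phrases in the LZ76 dictionary (phrase count).
--     """
--     if not input_string: # Handle empty string explicitly
--         return 0
--
--     current_word = ''
--     parsed_text_history = '' # Concatenation of completed phrases
--     remaining_string = input_string
--     dictionary_size = 0
--
--     while remaining_string != '':
--         next_character = remaining_string[0]
--         current_word += next_character
--         remaining_string = remaining_string[1:]
--         # No l_cw needed for `in` operator
--
--         # Search space is previously parsed phrases + current word prefix
--         search_space = parsed_text_history + current_word[:-1]
--
--         is_substring_in_history = current_word in search_space
--
--         if not is_substring_in_history: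
--             dictionary_size += 1
--             parsed_text_history += current_word
--             current_word = '' # Reset for the next phrase
--
--     if current_word != '': # Account for the last phrase if any
--         dictionary_size += 1
--     return dictionary_size
-- ===== SOURCE B (Python) =====
-- def get_inefficient_lz76_phrase_count(input_string: str) -> int:
--     """LZ76 phrase count via explicit longest-previous-match jumps over indices.
--
--     At each phrase start i, compute L = the longest l such that s[i:i+l]
--     matches s[p:p+l] for some p < i (overlap allowed); the phrase then has
--     length min(L + 1, n - i), so jump directly and count one phrase.
--     """
--     s = input_string
--     n = len(s)
--     i = 0
--     count = 0
--     while i < n: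
--         L = 0
--         for p in range(i):
--             l = 0
--             while i + l < n and s[p + l] == s[i + l]:
--                 l += 1
--             if l > L:
--                 L = l
--         i += min(L + 1, n - i)
--         count += 1
--     return count
-- ===== Notes on version B (the rewrite author's own statement) =====
-- stated objective: alternative
-- what changed: B replaces A's character-by-character growth of a current word with string concatenation and a substring-membership test by an index-based jump loop: at each phrase start it computes the longest previous match length directly by character comparisons and advances a whole phrase at once.
import Mathlib
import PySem

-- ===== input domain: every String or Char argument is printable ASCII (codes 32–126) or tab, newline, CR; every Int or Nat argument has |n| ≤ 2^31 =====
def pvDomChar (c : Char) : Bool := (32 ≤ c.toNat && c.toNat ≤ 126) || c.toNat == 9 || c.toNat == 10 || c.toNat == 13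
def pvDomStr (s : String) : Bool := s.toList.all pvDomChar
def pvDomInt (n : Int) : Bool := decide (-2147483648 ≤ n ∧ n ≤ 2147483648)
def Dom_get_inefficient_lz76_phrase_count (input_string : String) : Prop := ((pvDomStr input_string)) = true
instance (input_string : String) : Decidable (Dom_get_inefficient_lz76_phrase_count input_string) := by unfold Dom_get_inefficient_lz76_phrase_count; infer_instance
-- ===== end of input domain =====

-- B replaces A's grow-a-word-and-search-history loop by an index-based jump loop that
-- computes each phrase's longest previous match directly (objective: alternative).


-- ===== PORT A =====
-- A's while loop (state: current_word, parsed_text_history, remaining_string, dictionary_size),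
-- with the trailing 'if current_word != ""' folded into the [] case; Python's 'in' is PySem.Chars.isIn.
def pvAGo (current parsed remaining : List Char) (dict : Int) : Int :=
  match remaining with
  | [] => if current ≠ [] then dict + 1 else dict
  | c :: rest =>
    let cw := current ++ [c]
    let search := parsed ++ cw.dropLast
    if PySem.Chars.isIn cw search then pvAGo cw parsed rest dict
    else pvAGo [] (parsed ++ cw) rest (dict + 1)

def get_inefficient_lz76_phrase_count (input_string : String) : Int :=
  if input_string.toList = [] then 0
  else pvAGo [] [] input_string.toList 0

-- ===== PORT B =====
-- B's inner while loop: longest common extension of s[p:] and s[i:] by direct comparison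
def pvLcp : List Char → List Char → Nat
  | a :: as, b :: bs => if a = b then pvLcp as bs + 1 else 0
  | _, _ => 0

-- B's 'for p in range(i): … if l > L: L = l' as a fold over List.range i
def pvLmax (s : List Char) (i : Nat) : Nat :=
  (List.range i).foldl (fun acc p => max acc (pvLcp (s.drop p) (s.drop i))) 0

-- B's outer while loop: jump a whole phrase at a time
def pvBGo (s : List Char) (i : Nat) (count : Int) : Int :=
  if h : i < s.length then
    pvBGo s (i + min (pvLmax s i + 1) (s.length - i)) (count + 1)
  else count
termination_by s.length - i
decreasing_by omega

def get_inefficient_lz76_phrase_count_alt (input_string : String) : Int :=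
  pvBGo input_string.toList 0 0

-- ===== PRECONDITION & SPEC =====
def Spec_get_inefficient_lz76_phrase_count (input_string : String) (out : Int) : Prop := out = get_inefficient_lz76_phrase_count_alt input_string
instance (input_string : String) (out : Int) : Decidable (Spec_get_inefficient_lz76_phrase_count input_string out) := by unfold Spec_get_inefficient_lz76_phrase_count; infer_instance

-- ===== CLAIM (what is proved, stated in full; the proofs are below) =====
def Claim_equal_get_inefficient_lz76_phrase_count : Prop := ∀ (input_string : String), Dom_get_inefficient_lz76_phrase_count input_string → Spec_get_inefficient_lz76_phrase_count input_string (get_inefficient_lz76_phrase_count input_string)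

-- ===== LEMMAS AND PROOFS =====

-- one-step equation of A's loop
theorem pvAGo_cons (current parsed : List Char) (ch : Char) (rest : List Char) (d : Int) :
    pvAGo current parsed (ch :: rest) d =
      if PySem.Chars.isIn (current ++ [ch]) (parsed ++ (current ++ [ch]).dropLast)
      then pvAGo (current ++ [ch]) parsed rest d
      else pvAGo [] (parsed ++ (current ++ [ch])) rest (d + 1) := rfl

-- B's inner loop computes exactly "the first m characters agree (and exist)"
theorem pvLcp_iff (m : Nat) : ∀ (xs ys : List Char), m ≤ pvLcp xs ys ↔
    (m ≤ xs.length ∧ m ≤ ys.length ∧ xs.take m = ys.take m) := by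
  induction m with
  | zero => intro xs ys; simp
  | succ m ih =>
    intro xs ys
    match xs, ys with
    | [], _ => simp [pvLcp]
    | _ :: _, [] => simp [pvLcp]
    | a :: as, b :: bs =>
      by_cases hab : a = b
      · subst hab
        simp [pvLcp, ih as bs]
      · simp [pvLcp, hab]

-- B's running maximum is reached by some earlier start p
theorem pvLmax_le_iff (s : List Char) (i m : Nat) (hm : 1 ≤ m) :
    m ≤ pvLmax s i ↔ ∃ p < i, m ≤ pvLcp (s.drop p) (s.drop i) := by
  unfold pvLmax
  constructor
  · intro h
    have hmem := PySem.List.foldl_max_mem ((List.range i).map (fun p => pvLcp (s.drop p) (s.drop i))) 0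
    rw [List.foldl_map] at hmem
    rcases hmem with h0 | hmem
    · omega
    · rcases List.mem_map.mp hmem with ⟨p, hp, heq⟩
      exact ⟨p, List.mem_range.mp hp, by omega⟩
  · rintro ⟨p, hp, hle⟩
    have := (PySem.List.le_foldl_max_nat (List.range i) (fun p => pvLcp (s.drop p) (s.drop i)) 0).2
      p (List.mem_range.mpr hp)
    omega

-- A's membership test at word length m equals B's length bound m ≤ Lmax
theorem pvTest_iff (s : List Char) (i m : Nat) (hm : 1 ≤ m)
    (him : i + m ≤ s.length) :
    PySem.Chars.isIn ((s.drop i).take m) (s.take (i + m - 1)) = true ↔ m ≤ pvLmax s i := by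
  have hwlen : ((s.drop i).take m).length = m := by
    simp; omega
  rw [← PySem.Chars.exists_prefix_drop_iff_isIn, pvLmax_le_iff s i m hm]
  constructor
  · rintro ⟨j, hj⟩
    have hlen : ((s.drop i).take m).length ≤ ((s.take (i + m - 1)).drop j).length :=
      hj.length_le
    rw [hwlen] at hlen
    have hji : j < i := by
      simp at hlen; omega
    have hj' : (s.drop i).take m <+: s.drop j := by
      refine hj.trans ?_
      rw [List.drop_take]; exact List.take_prefix _ _
    have heq : (s.drop j).take m = (s.drop i).take m := by
      have h' := List.prefix_iff_eq_take.mp hj'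
      rw [hwlen] at h'
      exact h'.symm
    refine ⟨j, hji, (pvLcp_iff m _ _).mpr ⟨?_, ?_, heq⟩⟩
    · simp; omega
    · simp; omega
  · rintro ⟨p, hp, hle⟩
    rcases (pvLcp_iff m _ _).mp hle with ⟨h1, h2, heq⟩
    refine ⟨p, ?_⟩
    rw [List.drop_take, ← heq]
    exact List.take_prefix_take_left (by omega)

-- one phrase of A = one jump of B
theorem pvAGo_phrase (s : List Char) (i : Nat) (hi : i < s.length) (c : Int) :
    ∀ j, i ≤ j → j ≤ s.length → j - i ≤ pvLmax s i →
    pvAGo ((s.drop i).take (j - i)) (s.take i) (s.drop j) c =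
      pvAGo [] (s.take (i + min (pvLmax s i + 1) (s.length - i)))
        (s.drop (i + min (pvLmax s i + 1) (s.length - i))) (c + 1) := by
  suffices H : ∀ k j, s.length - j = k → i ≤ j → j ≤ s.length → j - i ≤ pvLmax s i →
      pvAGo ((s.drop i).take (j - i)) (s.take i) (s.drop j) c =
        pvAGo [] (s.take (i + min (pvLmax s i + 1) (s.length - i)))
          (s.drop (i + min (pvLmax s i + 1) (s.length - i))) (c + 1) by
    exact fun j h1 h2 h3 => H (s.length - j) j rfl h1 h2 h3
  intro k
  induction k with
  | zero =>
    intro j hk h1 h2 h3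
    have hj : j = s.length := by omega
    subst hj
    have hstep : i + min (pvLmax s i + 1) (s.length - i) = s.length := by omega
    rw [hstep]
    have hne : (s.drop i).take (s.length - i) ≠ [] := by
      have hl : ((s.drop i).take (s.length - i)).length = s.length - i := by simp
      intro hnil; rw [hnil] at hl; simp at hl; omega
    simp [pvAGo, hne]
  | succ k ih =>
    intro j hk h1 h2 h3
    have hj : j < s.length := by omega
    rw [List.drop_eq_getElem_cons hj, pvAGo_cons, List.dropLast_concat]
    have hcw : (s.drop i).take (j - i) ++ [s[j]] = (s.drop i).take (j - i + 1) := by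
      have h5 : j - i < (s.drop i).length := by simp; omega
      have hget : (s.drop i)[j - i]'h5 = s[j]'hj := by
        simp [List.getElem_drop]
        congr 1; omega
      rw [List.take_add_one, List.getElem?_eq_getElem h5, hget]
      simp
    have hsearch : s.take i ++ (s.drop i).take (j - i) = s.take j := by
      rw [← List.take_add]; congr 1; omega
    rw [hcw, hsearch]
    have harg : i + (j - i + 1) - 1 = j := by omega
    by_cases htest : j - i + 1 ≤ pvLmax s i
    · have ht := (pvTest_iff s i (j - i + 1) (by omega) (by omega)).mpr htest
      rw [harg] at ht
      rw [if_pos ht]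
      have h6 : j - i + 1 = j + 1 - i := by omega
      rw [h6]
      exact ih (j + 1) (by omega) (by omega) (by omega) (by omega)
    · have ht := (pvTest_iff s i (j - i + 1) (by omega) (by omega)).not.mpr htest
      rw [harg] at ht
      rw [if_neg ht]
      have hpar : s.take i ++ (s.drop i).take (j - i + 1) = s.take (j + 1) := by
        rw [← List.take_add]; congr 1; omega
      have hstep : i + min (pvLmax s i + 1) (s.length - i) = j + 1 := by omega
      rw [hpar, hstep]

-- whole run: A's loop starting fresh at position i = B's loop at i
theorem pvAGo_eq_pvBGo (s : List Char) : ∀ i, i ≤ s.length → ∀ c : Int,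
    pvAGo [] (s.take i) (s.drop i) c = pvBGo s i c := by
  suffices H : ∀ k, ∀ i, s.length - i = k → i ≤ s.length → ∀ c : Int,
      pvAGo [] (s.take i) (s.drop i) c = pvBGo s i c by
    exact fun i hi c => H (s.length - i) i rfl hi c
  intro k
  induction k using Nat.strong_induction_on with
  | _ k ih =>
    intro i hk hi c
    by_cases h : i < s.length
    · have hphrase := pvAGo_phrase s i h c i le_rfl (le_of_lt h) (by omega)
      rw [Nat.sub_self, List.take_zero] at hphrase
      rw [hphrase]
      have hst1 : 1 ≤ min (pvLmax s i + 1) (s.length - i) := by omega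
      have hst2 : i + min (pvLmax s i + 1) (s.length - i) ≤ s.length := by omega
      rw [ih (s.length - (i + min (pvLmax s i + 1) (s.length - i))) (by omega) _ rfl hst2 (c + 1)]
      conv_rhs => rw [pvBGo]
      rw [dif_pos h]
    · have hieq : i = s.length := by omega
      subst hieq
      rw [pvBGo, dif_neg h]
      simp [pvAGo]

-- ===== VERDICT (by name: the statement is the Claim_ definition above) =====
theorem get_inefficient_lz76_phrase_count_spec : Claim_equal_get_inefficient_lz76_phrase_count := by
  intro s _
  unfold Spec_get_inefficient_lz76_phrase_count get_inefficient_lz76_phrase_count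
    get_inefficient_lz76_phrase_count_alt
  by_cases h : s.toList = []
  · simp [h, pvBGo]
  · have := pvAGo_eq_pvBGo s.toList 0 (by omega) 0
    simpa [h] using this
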